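-- pv_equiv track=rewrite | github.com/daniel-reich/ubiquitous-fiesta | 7AA54JmzruLMwG6do_21.py | is_icecream_sandwich
-- ===== SOURCE A (Python) =====
-- def is_icecream_sandwich(txt):
--   if len(set(list(txt)))!=2: return False
--   for i in range(len(txt)):
--     if txt[i]!=txt[i+1]:
--       sandwich=txt[:i+1]
--       break
--   if txt[-len(sandwich):]!=sandwich: return False
--   return True
-- ===== SOURCE B (Python) =====
-- def is_icecream_sandwich(txt):
--   if len(set(txt)) != 2:
--     return False
--   other = next(c for c in txt if c != txt[0])
--   return txt.find(other) + txt.rfind(other) <= len(txt) - 1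
-- ===== Notes on version B (the rewrite author's own statement) =====
-- stated objective: alternative
-- what changed: Instead of scanning adjacent index pairs to cut off the leading run and comparing it with the suffix slice, B locates the first and last occurrence of the second distinct character with str.find/str.rfind and checks the index inequality find + rfind <= len - 1, which holds exactly when that character never reaches the last run-length positions.
import Mathlib
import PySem

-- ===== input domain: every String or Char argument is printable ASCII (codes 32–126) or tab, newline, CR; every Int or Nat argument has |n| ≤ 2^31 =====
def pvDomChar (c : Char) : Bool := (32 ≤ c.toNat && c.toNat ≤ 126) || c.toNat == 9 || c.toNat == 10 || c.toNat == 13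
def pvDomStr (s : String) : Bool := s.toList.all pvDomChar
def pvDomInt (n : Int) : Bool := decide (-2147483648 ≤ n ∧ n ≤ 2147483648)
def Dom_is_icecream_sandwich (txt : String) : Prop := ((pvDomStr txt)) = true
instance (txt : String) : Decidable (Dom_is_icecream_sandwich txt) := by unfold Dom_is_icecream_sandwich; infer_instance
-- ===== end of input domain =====

-- B replaces A's adjacent-pair scan and suffix-slice comparison by locating the first and last
-- occurrence of the second distinct character with str.find/str.rfind and checking the index
-- inequality find + rfind <= len - 1 (objective: alternative algorithm, same cost).

-- ===== PORT A =====
-- the 'for i in range(len(txt)): if txt[i]!=txt[i+1]: sandwich=txt[:i+1]; break' loop;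
-- none = loop reached an IndexError on txt[i+1] or finished without binding 'sandwich' (NameError) —
-- both unreachable once the two-distinct-characters guard has passed.
def pvFindSandwich (l : List Char) (i : Nat) : Option (List Char) :=
  if _h : i < l.length then
    match l[i]?, l[i+1]? with
    | some a, some b =>
        if a ≠ b then some (PySem.List.slice l none (some ((i : Int) + 1)))
        else pvFindSandwich l (i+1)
    | _, _ => none
  else none
termination_by l.length - i

def is_icecream_sandwich (txt : String) : Bool :=
  if PySem.Set.len (PySem.Set.ofList txt.toList) ≠ 2 then false
  else
    match pvFindSandwich txt.toList 0 with
    | none => false   -- unreachable under the guard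
    | some sandwich =>
        if PySem.List.slice txt.toList (some (-(sandwich.length : Int))) none ≠ sandwich then false
        else true

-- ===== PORT B =====
def is_icecream_sandwich_alt (txt : String) : Bool :=
  if PySem.Set.len (PySem.Set.ofList txt.toList) ≠ 2 then false
  else
    match PySem.Str.pyGet? txt 0 with
    | none => false   -- unreachable: the guard implies txt is nonempty
    | some first =>
        -- 'other = next(c for c in txt if c != txt[0])'
        match List.find? (fun c => c != first) txt.toList with
        | none => false   -- unreachable: the guard gives a second distinct character
        | some other =>
            decide (PySem.Str.find txt (String.ofList [other]) + PySem.Str.rfind txt (String.ofList [other])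
              ≤ PySem.Str.len txt - 1)

-- ===== PRECONDITION & SPEC =====
def Spec_is_icecream_sandwich (txt : String) (out : Bool) : Prop := out = is_icecream_sandwich_alt txt
instance (txt : String) (out : Bool) : Decidable (Spec_is_icecream_sandwich txt out) := by unfold Spec_is_icecream_sandwich; infer_instance

-- ===== CLAIM (what is proved, stated in full; the proofs are below) =====
def Claim_equal_is_icecream_sandwich : Prop := ∀ (txt : String), Dom_is_icecream_sandwich txt → Spec_is_icecream_sandwich txt (is_icecream_sandwich txt)

-- ===== LEMMAS AND PROOFS =====

-- the leading run counted by B's reasoning: length of the maximal prefix of equal-to-f characters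
def pvCountRun (l : List Char) (first : Char) : Nat :=
  match l with
  | [] => 0
  | c :: rest => if c ≠ first then 0 else pvCountRun rest first + 1

-- turns the cast bound of A's prefix slice into List.take
theorem pvSlice_take_cast (l : List Char) (i : Nat) :
    PySem.List.slice l none (some ((i : Int) + 1)) = l.take (i+1) := by
  rw [show ((i : Int) + 1) = (((i+1 : Nat) : Int)) by push_cast; ring]
  exact PySem.List.slice_to_natCast _ _

-- A's scan, shifted by one position, prepends the skipped character to the found prefix.
theorem pvFindSandwich_shift (a : Char) (l : List Char) (i : Nat) :
    pvFindSandwich (a :: l) (i+1) = (pvFindSandwich l i).map (a :: ·) := by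
  induction i using pvFindSandwich.induct (l := l) with
  | case1 i h x y hy hx hne =>
      conv_lhs => rw [pvFindSandwich]
      conv_rhs => rw [pvFindSandwich]
      have hlen : i + 1 < (a :: l).length := by simp; omega
      have hc : ((i+1 : Nat) : Int) + 1 = ((i : Nat) : Int) + 1 + 1 := by push_cast; ring
      have hxe : l[i] = x := (List.getElem?_eq_some_iff.mp hx).2
      simp [h, hlen, hx, hy, hne, ← hc, pvSlice_take_cast, hxe]
  | case2 i h x y hy hx hne ih =>
      conv_lhs => rw [pvFindSandwich]
      conv_rhs => rw [pvFindSandwich]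
      have hlen : i + 1 < (a :: l).length := by simp; omega
      simp only [ne_eq, not_not] at hne
      have hxe : l[i] = x := (List.getElem?_eq_some_iff.mp hx).2
      simp [h, hlen, hx, hy, hne, ih, hxe]
  | case3 i h hm =>
      conv_lhs => rw [pvFindSandwich]
      conv_rhs => rw [pvFindSandwich]
      have hlen : i + 1 < (a :: l).length := by simp; omega
      cases hx : l[i]? with
      | none => exact absurd ((List.getElem?_eq_some_iff.mpr ⟨h, rfl⟩)) (by simp [hx])
      | some c =>
          have hy : l[i+1]? = none := by
            cases hy : l[i+1]? with
            | none => rfl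
            | some d => exact absurd (hm c d hx hy) (fun x => x)
          simp [h, hlen, hx, hy]
  | case4 i h =>
      conv_lhs => rw [pvFindSandwich]
      conv_rhs => rw [pvFindSandwich]
      have hlen : ¬ i + 1 < (a :: l).length := by simp; omega
      simp [h, hlen]

theorem pvCountRun_le (l : List Char) (f : Char) : pvCountRun l f ≤ l.length := by
  induction l with
  | nil => simp [pvCountRun]
  | cons c rest ih => by_cases h : c = f <;> simp [pvCountRun, h] <;> omega

-- If every element equals the head, the dedup set is a singleton.
theorem pvOfList_const (f : Char) : ∀ (t : List Char), (∀ c ∈ t, c = f) →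
    PySem.Set.ofList (f :: t) = [f] := by
  intro t
  induction t with
  | nil => intro _; rfl
  | cons b t ih =>
      intro h
      have hb : b = f := h b (by simp)
      have : ∀ c ∈ t, c = f := fun c hc => h c (by simp [hc])
      have := ih this
      subst hb
      simpa [PySem.Set.ofList, List.foldl, PySem.Set.add] using
        (by simpa [PySem.Set.ofList, List.foldl, PySem.Set.add] using this)

-- A's scan finds exactly the leading run, provided some later character differs from the head.
theorem pvFindSandwich_eq_run (f : Char) : ∀ (t : List Char), (∃ c ∈ t, c ≠ f) →
    pvFindSandwich (f :: t) 0 = some ((f :: t).take (pvCountRun (f :: t) f)) := by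
  intro t
  induction t with
  | nil => rintro ⟨c, hc, _⟩; simp at hc
  | cons b t ih =>
      intro hex
      by_cases hbf : b = f
      · subst hbf
        have hex' : ∃ c ∈ t, c ≠ b := by
          obtain ⟨c, hc, hne⟩ := hex
          rcases List.mem_cons.mp hc with h | h
          · exact absurd h hne
          · exact ⟨c, h, hne⟩
        rw [pvFindSandwich]
        have h01 : (b :: b :: t)[0]? = some b := rfl
        have h11 : (b :: b :: t)[1]? = some b := rfl
        simp only [List.length_cons, h01, h11, Nat.succ_sub_one, show (0:Nat) < t.length + 1 + 1 by omega, dite_true]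
        simp only [ne_eq, not_true_eq_false, if_false]
        have hshift := pvFindSandwich_shift b (b :: t) 0
        rw [show (0:Nat)+1 = 1 from rfl] at hshift
        rw [hshift, ih hex']
        simp [pvCountRun, List.take_succ_cons]
      · rw [pvFindSandwich]
        have h01 : (f :: b :: t)[0]? = some f := rfl
        have h11 : (f :: b :: t)[1]? = some b := rfl
        simp only [List.length_cons, h01, h11, show (0:Nat) < t.length + 1 + 1 by omega, dite_true]
        have hne : ¬ f = b := fun h => hbf h.symm
        simp only [ne_eq, hne, not_false_eq_true, if_true]
        have : pvCountRun (f :: b :: t) f = 1 := by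
          simp [pvCountRun, hbf]
        rw [this]
        simp [PySem.List.slice]

theorem pvSet_two_exists (f : Char) (t : List Char)
    (h : PySem.Set.len (PySem.Set.ofList (f :: t)) = 2) : ∃ c ∈ t, c ≠ f := by
  by_contra hall
  push_neg at hall
  have := pvOfList_const f t hall
  rw [this] at h
  simp [PySem.Set.len] at h

-- with exactly two distinct characters, every character is the head f or the other one o
theorem pvTwoDistinct (l : List Char) (h : PySem.Set.len (PySem.Set.ofList l) = 2)
    (f o : Char) (hf : f ∈ l) (ho : o ∈ l) (hof : o ≠ f) :
    ∀ c ∈ l, c = f ∨ c = o := by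
  intro c hc
  have hlen : (PySem.Set.ofList l).length = 2 := by
    have h' := h
    simp only [PySem.Set.len] at h'
    exact_mod_cast h'
  obtain ⟨a, b, hab⟩ := List.length_eq_two.mp hlen
  have hmem : ∀ x : Char, x ∈ l → x = a ∨ x = b := by
    intro x hx
    have : x ∈ PySem.Set.ofList l := (PySem.Set.mem_ofList _ _).mpr hx
    rw [hab] at this
    simpa using this
  rcases hmem f hf with hfa | hfb <;> rcases hmem o ho with hoa | hob <;>
    rcases hmem c hc with hca | hcb <;> subst_vars <;> tauto

-- the prefix of length pvCountRun is constant
theorem pvTake_run (l : List Char) (f : Char) :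
    l.take (pvCountRun l f) = List.replicate (pvCountRun l f) f := by
  induction l with
  | nil => simp [pvCountRun]
  | cons c rest ih =>
      by_cases hc : c = f
      · subst hc; simp [pvCountRun, List.replicate_succ, ih]
      · simp [pvCountRun, hc]

-- past the run there is a character different from f (when one exists at all)
theorem pvDrop_run (l : List Char) (f : Char) (hex : ∃ c ∈ l, c ≠ f) :
    ∃ o r, l.drop (pvCountRun l f) = o :: r ∧ o ≠ f := by
  induction l with
  | nil => obtain ⟨c, hc, _⟩ := hex; simp at hc
  | cons c rest ih =>
      by_cases hc : c = f
      · subst hc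
        have hex' : ∃ d ∈ rest, d ≠ c := by
          obtain ⟨d, hd, hdf⟩ := hex
          rcases List.mem_cons.mp hd with h | h
          · exact absurd h hdf
          · exact ⟨d, h, hdf⟩
        obtain ⟨o, r, hdr, hof⟩ := ih hex'
        exact ⟨o, r, by simpa [pvCountRun] using hdr, hof⟩
      · exact ⟨c, rest, by simp [pvCountRun, hc], hc⟩

-- Python's next(c for c in txt if c != txt[0]) on a run-decomposed list yields the other character
theorem pvFind?_repl (f o : Char) (hof : o ≠ f) (r : List Char) :
    ∀ k : Nat, List.find? (fun c => c != f) (List.replicate k f ++ o :: r) = some o := by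
  intro k
  induction k with
  | zero => simp [List.find?, hof]
  | succ kk ih => simpa [List.replicate_succ, List.find?] using ih

-- [o] is a prefix of drop i l exactly when l[i] is o
theorem pvPrefixDrop (l : List Char) (o : Char) (i : Nat) :
    ([o].isPrefixOf (l.drop i) = true) ↔ l[i]? = some o := by
  rw [← List.head?_drop]
  cases h : l.drop i with
  | nil => simp [List.isPrefixOf]
  | cons c cs =>
      simp [List.isPrefixOf]
      exact eq_comm

-- str.find of the single other character on a run-decomposed list returns the run length
theorem pvFindGo (o f : Char) (hof : o ≠ f) (r : List Char) :
    ∀ (k acc : Nat), PySem.Chars.find.go [o] (List.replicate k f ++ o :: r) acc = (acc : Int) + k := by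
  intro k
  induction k with
  | zero =>
      intro acc
      simp only [List.replicate_zero, List.nil_append]
      rw [PySem.Chars.find.go]
      have hpre : ([o].isPrefixOf (o :: r)) = true := by simp [List.isPrefixOf]
      rw [if_pos hpre]
      simp
  | succ kk ih =>
      intro acc
      rw [List.replicate_succ, List.cons_append, PySem.Chars.find.go]
      have : ([o].isPrefixOf (f :: (List.replicate kk f ++ o :: r))) = false := by
        simp [List.isPrefixOf, hof]
      rw [this]
      simp only [Bool.false_eq_true, if_false, ih (acc+1)]
      push_cast; ring

-- str.rfind of a single character is below m exactly when the character is absent from positions ≥ m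
theorem pvRfindGo_lt_iff (l : List Char) (o : Char) (m : Nat) :
    ∀ j : Nat, (PySem.Chars.rfind.go l [o] j < (m : Int)) ↔
      (∀ i, m ≤ i → i ≤ j → l[i]? ≠ some o) := by
  intro j
  induction j with
  | zero =>
      rw [PySem.Chars.rfind.go]
      by_cases hp : [o].isPrefixOf l = true
      · have h0 : l[0]? = some o := by
          have := (pvPrefixDrop l o 0).mp (by simpa using hp)
          simpa using this
        rw [if_pos hp]
        constructor
        · intro hlt i h1 h2
          exfalso; omega
        · intro h
          by_contra hm
          push_neg at hm
          have hm0 : m = 0 := by omega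
          exact h 0 (by omega) (by omega) h0
      · have h0 : l[0]? ≠ some o := fun hc => hp ((pvPrefixDrop l o 0).mpr (by simpa using hc))
        rw [if_neg hp]
        constructor
        · intro _ i h1 h2
          have : i = 0 := by omega
          subst this; exact h0
        · intro _; omega
  | succ j ih =>
      rw [PySem.Chars.rfind.go]
      by_cases hp : [o].isPrefixOf (l.drop (j+1)) = true
      · have hj : l[j+1]? = some o := (pvPrefixDrop l o (j+1)).mp hp
        rw [if_pos hp]
        constructor
        · intro hlt i h1 h2
          exfalso
          have : (j:Int) + 1 < m := by exact_mod_cast hlt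
          omega
        · intro h
          by_contra hm
          push_neg at hm
          have hmle : m ≤ j + 1 := by
            have : (m:Int) ≤ (j:Nat) + 1 := by exact_mod_cast hm
            exact_mod_cast this
          exact h (j+1) hmle (le_refl _) hj
      · have hj : l[j+1]? ≠ some o := fun hc => hp ((pvPrefixDrop l o (j+1)).mpr hc)
        rw [if_neg hp]
        constructor
        · intro hlt i h1 h2
          rcases Nat.lt_or_ge i (j+1) with hi | hi
          · exact (ih.mp hlt) i h1 (by omega)
          · have : i = j + 1 := by omega
            subst this; exact hj
        · intro h
          exact ih.mpr (fun i h1 h2 => h i h1 (by omega))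

-- negative-start slice with 0 < k ≤ len = the length-k suffix
theorem pvSlice_neg (xs : List Char) (k : Nat) (h1 : 0 < k) (h2 : k ≤ xs.length) :
    PySem.List.slice xs (some (-(k : Int))) none = xs.drop (xs.length - k) := by
  have hneg : (-(k : Int)) < 0 := by omega
  have hnn : ¬ ((xs.length : Int) + (-(k : Int)) < 0) := by omega
  have ht : ((xs.length : Int) + (-(k : Int))).toNat = xs.length - k := by omega
  simp only [PySem.List.slice, PySem.List.clampIdx, if_pos hneg, if_neg hnn, ht]
  apply List.take_of_length_le
  simp only [List.length_drop]
  omega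

-- the length-k suffix is constant f exactly when o never occurs at positions ≥ len - k
theorem pvSuffix_iff (l : List Char) (f o : Char) (k : Nat) (hof : o ≠ f)
    (hk : k ≤ l.length) (hdich : ∀ c ∈ l, c = f ∨ c = o) :
    (l.drop (l.length - k) = List.replicate k f) ↔
      (∀ i, l.length - k ≤ i → i ≤ l.length → l[i]? ≠ some o) := by
  constructor
  · intro he i h1 h2 hcon
    obtain ⟨hi, hv⟩ := List.getElem?_eq_some_iff.mp hcon
    have hidx : i - (l.length - k) < (l.drop (l.length - k)).length := by
      simp [List.length_drop]; omega
    have hg : (l.drop (l.length - k))[i - (l.length - k)]'hidx = l[i]'hi := by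
      rw [List.getElem_drop]
      congr 1
      omega
    have : (l.drop (l.length - k))[i - (l.length - k)]'hidx = f := by
      rw [List.getElem_of_eq he, List.getElem_replicate]
    rw [hg, hv] at this
    exact hof this
  · intro h
    rw [List.eq_replicate_iff]
    refine ⟨by simp [List.length_drop]; omega, ?_⟩
    intro b hb
    obtain ⟨i, hi, hbe⟩ := List.getElem_of_mem hb
    have hg : (l.drop (l.length - k))[i]'hi = l[(l.length - k) + i]'(by
        have := hi; simp [List.length_drop] at this; omega) := List.getElem_drop
    have hbl : b ∈ l := by
      rw [← hbe, hg]; exact List.getElem_mem _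
    rcases hdich b hbl with hbf | hbo
    · exact hbf
    · exfalso
      have hlt : l.length - k + i < l.length := by
        have := hi; simp [List.length_drop] at this; omega
      have : l[(l.length - k) + i]? = some o := by
        rw [List.getElem?_eq_some_iff]
        exact ⟨hlt, by rw [← hg, hbe, hbo]⟩
      exact h _ (by omega) (by omega) this

-- ===== VERDICT (by name: the statement is the Claim_ definition above) =====
theorem is_icecream_sandwich_spec : Claim_equal_is_icecream_sandwich := by
  intro txt _
  unfold Spec_is_icecream_sandwich is_icecream_sandwich is_icecream_sandwich_alt
  by_cases hg : PySem.Set.len (PySem.Set.ofList txt.toList) = 2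
  · simp only [hg, ne_eq, not_true_eq_false, if_false]
    cases hl : txt.toList with
    | nil => rw [hl] at hg; simp [PySem.Set.ofList, PySem.Set.len] at hg
    | cons f t =>
        rw [hl] at hg
        have hex := pvSet_two_exists f t hg
        have hkle : pvCountRun (f :: t) f ≤ (f :: t).length := pvCountRun_le (f :: t) f
        have hkpos : 0 < pvCountRun (f :: t) f := by simp [pvCountRun]
        have hexl : ∃ c ∈ f :: t, c ≠ f := by
          obtain ⟨c, hc, hne⟩ := hex
          exact ⟨c, by simp [hc], hne⟩
        obtain ⟨o, r, hdr, hof⟩ := pvDrop_run (f :: t) f hexl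
        have hdecomp : f :: t = List.replicate (pvCountRun (f :: t) f) f ++ o :: r := by
          conv_lhs => rw [← List.take_append_drop (pvCountRun (f :: t) f) (f :: t)]
          rw [pvTake_run, hdr]
        have hol : o ∈ f :: t := by rw [hdecomp]; simp
        have hfl : f ∈ f :: t := by simp
        have hdich := pvTwoDistinct (f :: t) hg f o hfl hol hof
        -- A side: the scan finds the leading run
        rw [pvFindSandwich_eq_run f t hex]
        have htakerepl : (f :: t).take (pvCountRun (f :: t) f)
            = List.replicate (pvCountRun (f :: t) f) f := pvTake_run _ _
        -- B side: the generator yields o, find/rfind reduce to Chars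
        have h0 : PySem.Str.pyGet? txt 0 = some f := by
          simp [hl, PySem.List.pyGet?, PySem.List.pyIdx?]
        have hfindq : List.find? (fun c => c != f) (f :: t) = some o := by
          rw [hdecomp]
          exact pvFind?_repl f o hof r (pvCountRun (f :: t) f)
        have hmk : (String.ofList [o]).toList = [o] := by simp
        have hfind : PySem.Chars.find (f :: t) [o] = ((pvCountRun (f :: t) f : Nat) : Int) := by
          show PySem.Chars.find.go [o] (f :: t) 0 = _
          conv_lhs => rw [hdecomp]
          rw [pvFindGo o f hof r (pvCountRun (f :: t) f) 0]
          simp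
        have hrfind : PySem.Chars.rfind (f :: t) [o]
            = PySem.Chars.rfind.go (f :: t) [o] (f :: t).length := rfl
        simp only [h0, hfindq, PySem.Str.find_eq, PySem.Str.rfind_eq, PySem.Str.len_eq, hmk, hl,
          htakerepl, List.length_replicate, pvSlice_neg (f :: t) (pvCountRun (f :: t) f) hkpos hkle,
          hfind, hrfind]
        have hkn : pvCountRun (f :: t) f < (f :: t).length := by
          have hlen2 : (f :: t).length = pvCountRun (f :: t) f + r.length + 1 := by
            conv_lhs => rw [hdecomp]
            rw [List.length_append, List.length_replicate, List.length_cons]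
            omega
          omega
        have hcast : (((f :: t).length - pvCountRun (f :: t) f : Nat) : Int)
            = ((f :: t).length : Int) - (pvCountRun (f :: t) f : Int) := by omega
        have hiff : ((f :: t).drop ((f :: t).length - pvCountRun (f :: t) f)
              = List.replicate (pvCountRun (f :: t) f) f) ↔
            (((pvCountRun (f :: t) f : Nat) : Int)
              + PySem.Chars.rfind.go (f :: t) [o] (f :: t).length ≤ ((f :: t).length : Int) - 1) := by
          rw [pvSuffix_iff (f :: t) f o (pvCountRun (f :: t) f) hof hkle hdich,
            ← pvRfindGo_lt_iff (f :: t) o ((f :: t).length - pvCountRun (f :: t) f) (f :: t).length,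
            hcast]
          constructor <;> intro h <;> omega
        have hbool : ∀ (A : Prop) [Decidable A], (if ¬ A then false else true) = decide A := by
          intro A _
          by_cases h : A <;> simp [h]
        rw [hbool, decide_eq_decide.mpr hiff]
  · rw [if_pos hg, if_pos hg]
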